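-- pv_equiv track=rewrite | github.com/wklken/pytools | others/trans_lasttable_xml.py | output_lines
-- ===== SOURCE A (Python) =====
-- def output_lines(array, result, with_tag):
--   out_lines = []
--   for xml_cell in result:
--     line = []
--     for col in array:
--       if "=" in col:
--         if with_tag:
--           line.append(col)
--         else:
--           line.append(col.split("=")[1])
--         continue
--       if xml_cell.get(col) != None:
--         if with_tag:
--           line.append(col+"="+xml_cell.get(col))
--         else:
--           line.append(xml_cell.get(col))
--       else:
--           line.append('')
--       #else:
--       #  if with_tag:
--       #    line.append(col+"=")
--       #  else:
--       #    line.append('')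
--     if len(line) > 0:
--       out_lines.append(line)
--   return out_lines
-- ===== SOURCE B (Python) =====
-- def output_lines(array, result, with_tag):
--     # Column-major: build one full column of output strings per entry of
--     # `array`, then transpose the columns into rows.  A literal "k=v" column
--     # is a constant column; a data column is the per-cell lookup mapped over
--     # all of `result`.  Empty `array` => no columns => no rows (A skips
--     # empty rows).  Correct because every column has length len(result), so
--     # row i of the transpose is exactly A's row for result[i].
--     if not array:
--         return []
--     n = len(result)
--     columns = []
--     for col in array:
--         if "=" in col:
--             columns.append([col if with_tag else col.split("=")[1]] * n)
--         else:
--             columns.append([(col + "=" + v if with_tag else v)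
--                             if (v := cell.get(col)) is not None else ''
--                             for cell in result])
--     return [[c[i] for c in columns] for i in range(n)]
-- ===== Notes on version B (the rewrite author's own statement) =====
-- stated objective: alternative
-- what changed: B builds the output column-major: one complete column of strings per array entry (a constant column for literal 'k=v' entries, a mapped lookup column otherwise), then transposes the columns into rows; A builds row-major with a nested per-cell/per-column loop and a per-row emptiness test.
import Mathlib
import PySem

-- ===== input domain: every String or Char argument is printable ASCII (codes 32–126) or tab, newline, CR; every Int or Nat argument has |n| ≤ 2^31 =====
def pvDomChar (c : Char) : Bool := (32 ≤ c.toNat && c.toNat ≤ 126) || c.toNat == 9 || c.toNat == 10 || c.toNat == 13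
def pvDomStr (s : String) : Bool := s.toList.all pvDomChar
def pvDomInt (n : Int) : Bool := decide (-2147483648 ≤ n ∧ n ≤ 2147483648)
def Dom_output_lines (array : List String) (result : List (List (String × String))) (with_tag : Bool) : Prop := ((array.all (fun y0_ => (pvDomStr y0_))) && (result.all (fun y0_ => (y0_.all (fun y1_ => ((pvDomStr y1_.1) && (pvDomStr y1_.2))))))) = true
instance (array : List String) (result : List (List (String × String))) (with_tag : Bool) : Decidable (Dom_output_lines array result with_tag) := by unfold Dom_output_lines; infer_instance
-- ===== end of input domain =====

-- B builds the output column-major (one full column per array entry, then a transpose into rows) instead of A's row-major nested loop; alternative decomposition, no speed claim.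

-- ===== PORT A =====
-- col.split("=")[1]; the defaults are never hit when "=" ∈ col (split then has ≥ 2 parts)
def pvSplitSnd (col : String) : String :=
  (PySem.List.pyGet? ((PySem.Str.split? col "=").getD []) 1).getD ""

def output_lines (array : List String) (result : List (List (String × String))) (with_tag : Bool) : List (List String) :=
  result.foldl (fun out_lines xml_cell =>
    let line := array.foldl (fun line col =>
      if PySem.Str.isIn "=" col then
        (if with_tag then line ++ [col] else line ++ [pvSplitSnd col])
      else
        match (PySem.Dict.mk xml_cell).get? col with
        | some v => if with_tag then line ++ [col ++ "=" ++ v] else line ++ [v]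
        | none => line ++ [""]) []
    if line.length > 0 then out_lines ++ [line] else out_lines) []

-- ===== PORT B =====
def output_lines_alt (array : List String) (result : List (List (String × String))) (with_tag : Bool) : List (List String) :=
  if array.isEmpty then []
  else
    let n : Int := result.length
    let columns : List (List String) := array.foldl (fun columns col =>
      if PySem.Str.isIn "=" col then
        columns ++ [List.replicate result.length (if with_tag then col else pvSplitSnd col)]
      else
        columns ++ [result.map (fun cell =>
          match (PySem.Dict.mk cell).get? col with
          | some v => if with_tag then col ++ "=" ++ v else v
          | none => "")]) []
    -- [[c[i] for c in columns] for i in range(n)]; every column has length n, so c[i] is in range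
    (PySem.List.pyRange 0 n 1).map (fun i =>
      columns.map (fun c => PySem.List.pyGetD c i ""))

-- ===== PRECONDITION & SPEC =====
def Spec_output_lines (array : List String) (result : List (List (String × String))) (with_tag : Bool) (out : List (List String)) : Prop := out = output_lines_alt array result with_tag
instance (array : List String) (result : List (List (String × String))) (with_tag : Bool) (out : List (List String)) : Decidable (Spec_output_lines array result with_tag out) := by unfold Spec_output_lines; infer_instance

-- ===== CLAIM (what is proved, stated in full; the proofs are below) =====
def Claim_equal_output_lines : Prop := ∀ (array : List String) (result : List (List (String × String))) (with_tag : Bool), Dom_output_lines array result with_tag → Spec_output_lines array result with_tag (output_lines array result with_tag)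

-- ===== LEMMAS AND PROOFS =====

-- the entry both programs produce for a given cell and column
def pvElem (with_tag : Bool) (xml_cell : List (String × String)) (col : String) : String :=
  if PySem.Str.isIn "=" col then
    (if with_tag then col else pvSplitSnd col)
  else
    match (PySem.Dict.mk xml_cell).get? col with
    | some v => if with_tag then col ++ "=" ++ v else v
    | none => ""

-- the column B builds for a given column name
def pvCol (result : List (List (String × String))) (with_tag : Bool) (col : String) : List String :=
  if PySem.Str.isIn "=" col then
    List.replicate result.length (if with_tag then col else pvSplitSnd col)
  else
    result.map (fun cell =>
      match (PySem.Dict.mk cell).get? col with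
      | some v => if with_tag then col ++ "=" ++ v else v
      | none => "")

theorem pvCol_getElem (result : List (List (String × String))) (with_tag : Bool) (col : String)
    (k : Nat) (hk : k < result.length) :
    (pvCol result with_tag col).getD k "" = pvElem with_tag result[k] col := by
  unfold pvCol pvElem
  split
  · rw [List.getD_eq_getElem _ _ (by simpa using hk)]
    simp
  · rw [List.getD_eq_getElem _ _ (by simpa using hk)]
    simp

-- A's inner fold builds the map of pvElem over the columns
theorem innerFoldA (with_tag : Bool) (xml_cell : List (String × String)) (array : List String) (acc : List String) :
    array.foldl (fun line col =>
      if PySem.Str.isIn "=" col then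
        (if with_tag then line ++ [col] else line ++ [pvSplitSnd col])
      else
        match (PySem.Dict.mk xml_cell).get? col with
        | some v => if with_tag then line ++ [col ++ "=" ++ v] else line ++ [v]
        | none => line ++ [""]) acc
    = acc ++ array.map (pvElem with_tag xml_cell) := by
  induction array generalizing acc with
  | nil => simp
  | cons c cs ih =>
    simp only [List.foldl_cons, List.map_cons]
    rw [ih]
    unfold pvElem
    by_cases h : PySem.Str.isIn "=" c = true
    · rw [if_pos h, if_pos h]
      cases with_tag <;> simp
    · rw [if_neg h, if_neg h]
      cases hg : (PySem.Dict.mk xml_cell).get? c <;> cases with_tag <;> simp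

-- B's column fold builds the map of pvCol over the columns
theorem colFoldB (array : List String) (result : List (List (String × String))) (with_tag : Bool)
    (acc : List (List String)) :
    array.foldl (fun columns col =>
      if PySem.Str.isIn "=" col then
        columns ++ [List.replicate result.length (if with_tag then col else pvSplitSnd col)]
      else
        columns ++ [result.map (fun cell =>
          match (PySem.Dict.mk cell).get? col with
          | some v => if with_tag then col ++ "=" ++ v else v
          | none => "")]) acc
    = acc ++ array.map (pvCol result with_tag) := by
  induction array generalizing acc with
  | nil => simp
  | cons c cs ih =>
    simp only [List.foldl_cons, List.map_cons]
    rw [ih]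
    unfold pvCol
    by_cases h : PySem.Chars.isIn ['='] c.toList = true <;> simp [h]

theorem foldl_append_all {α : Type} (f : α → List String) (h : ∀ x, (f x).length > 0)
    (rs : List α) (acc : List (List String)) :
    rs.foldl (fun out x => if (f x).length > 0 then out ++ [f x] else out) acc
      = acc ++ rs.map f := by
  induction rs generalizing acc with
  | nil => simp
  | cons q qs ih => simp [if_pos (h q), ih]

theorem output_lines_eq (array : List String) (result : List (List (String × String))) (with_tag : Bool) :
    output_lines array result with_tag = output_lines_alt array result with_tag := by
  unfold output_lines output_lines_alt
  simp only [innerFoldA, colFoldB, List.nil_append]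
  rcases harr : array with _ | ⟨c, cs⟩
  · simp
  · rw [foldl_append_all (fun xml_cell => (c :: cs).map (pvElem with_tag xml_cell))
        (fun xc => by simp)]
    simp only [List.isEmpty_cons, Bool.false_eq_true, if_false, List.nil_append]
    rw [PySem.List.pyRange_one]
    simp only [sub_zero, Int.toNat_natCast, List.map_map]
    apply List.ext_getElem
    · simp
    · intro k h1 h2
      simp only [List.getElem_map, List.getElem_range, Function.comp]
      have hk : k < result.length := by simpa using h2
      refine List.map_congr_left (fun col _ => ?_)
      simp only [Function.comp_apply, zero_add, PySem.List.pyGetD_natCast]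
      exact (pvCol_getElem result with_tag col k hk).symm

-- ===== VERDICT (by name: the statement is the Claim_ definition above) =====
theorem output_lines_spec : Claim_equal_output_lines := by
  intro array result with_tag _
  unfold Spec_output_lines
  exact output_lines_eq array result with_tag
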